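-- pv_equiv track=rewrite | github.com/MatheusPercine/TEP | lista1/G/g1.py | max_removed_chars
-- ===== SOURCE A (Python) =====
-- def max_removed_chars(s):
--     n = len(s)
--
--     # Prefix sums
--     prefix_0 = [0] * (n + 1)
--     prefix_1 = [0] * (n + 1)
--
--     for i in range(n):
--         prefix_0[i + 1] = prefix_0[i] + (1 if s[i] == '0' else 0)
--         prefix_1[i + 1] = prefix_1[i] + (1 if s[i] == '1' else 0)
--
--     max_removed = 0
--
--     # Evaluate all possible substrings
--     for i in range(n):
--         for j in range(i + 1, n + 1):
--             count_0 = prefix_0[j] - prefix_0[i]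
--             count_1 = prefix_1[j] - prefix_1[i]
--
--             if count_0 < count_1:
--                 max_removed = max(max_removed, count_0)
--             elif count_1 < count_0:
--                 max_removed = max(max_removed, count_1)
--
--     return max_removed
-- ===== SOURCE B (Python) =====
-- def max_removed_chars(s):
--     t0 = s.count('0')
--     t1 = s.count('1')
--     return min(t0, t1) if t0 != t1 else max(t0 - 1, 0)
-- ===== Notes on version B (the rewrite author's own statement) =====
-- stated objective: faster
-- what changed: Replaced A's prefix-sum tables plus a scan over all O(n^2) substrings by a closed form on the two total tallies of zero and one characters: min(t0,t1) when they differ, else max(t0-1,0).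
import Mathlib
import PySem

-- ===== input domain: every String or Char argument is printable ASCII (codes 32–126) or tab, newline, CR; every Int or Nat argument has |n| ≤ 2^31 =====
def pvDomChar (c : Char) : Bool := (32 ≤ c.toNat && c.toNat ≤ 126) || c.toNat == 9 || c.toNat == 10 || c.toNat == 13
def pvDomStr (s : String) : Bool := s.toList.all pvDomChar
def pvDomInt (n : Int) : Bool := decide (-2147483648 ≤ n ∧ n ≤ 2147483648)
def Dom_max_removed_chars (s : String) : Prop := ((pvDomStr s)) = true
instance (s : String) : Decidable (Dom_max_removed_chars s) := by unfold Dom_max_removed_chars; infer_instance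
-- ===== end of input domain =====

-- B replaces A's quadratic scan over all substrings by a closed form on the two total
-- zero-count/one-count tallies: min if they differ, else max(t0-1,0)  (objective: faster, O(n^2) -> O(n)).


-- ===== PORT A =====
-- All list indices A uses (i, i+1 ≤ n on lists of length n+1) are in range, so
-- `getD`/`set` here are exact for Python's indexing/assignment.
def max_removed_chars (s : String) : Int :=
  let l := s.toList
  let n := l.length
  let pr :=
    (List.range n).foldl
      (fun (pr : List Int × List Int) i =>
        (pr.1.set (i+1) (pr.1.getD i 0 + (if l.getD i ' ' = '0' then 1 else 0)),
         pr.2.set (i+1) (pr.2.getD i 0 + (if l.getD i ' ' = '1' then 1 else 0))))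
      (List.replicate (n+1) 0, List.replicate (n+1) 0)
  (List.range n).foldl
    (fun m i =>
      (List.range' (i+1) (n-i)).foldl
        (fun m j =>
          let c0 := pr.1.getD j 0 - pr.1.getD i 0
          let c1 := pr.2.getD j 0 - pr.2.getD i 0
          if c0 < c1 then max m c0 else if c1 < c0 then max m c1 else m)
        m)
    0

-- ===== PORT B =====
def max_removed_chars_alt (s : String) : Int :=
  let t0 : Int := s.toList.count '0'
  let t1 : Int := s.toList.count '1'
  if t0 ≠ t1 then min t0 t1 else max (t0 - 1) 0

-- ===== PRECONDITION & SPEC =====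
def Spec_max_removed_chars (s : String) (out : Int) : Prop := out = max_removed_chars_alt s
instance (s : String) (out : Int) : Decidable (Spec_max_removed_chars s out) := by unfold Spec_max_removed_chars; infer_instance

-- ===== CLAIM (what is proved, stated in full; the proofs are below) =====
def Claim_equal_max_removed_chars : Prop := ∀ (s : String), Dom_max_removed_chars s → Spec_max_removed_chars s (max_removed_chars s)

-- ===== LEMMAS AND PROOFS =====

-- prefix count as an Int
def pvF (c : Char) (l : List Char) (k : Nat) : Int := ((l.take k).count c : Int)

-- A's prefix list after i loop iterations
def pvPart (c : Char) (l : List Char) (i : Nat) : List Int :=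
  (List.range (i+1)).map (pvF c l) ++ List.replicate (l.length - i) 0

lemma pvF_zero (c : Char) (l : List Char) : pvF c l 0 = 0 := by simp [pvF]

lemma pvF_nonneg (c : Char) (l : List Char) (k : Nat) : 0 ≤ pvF c l k := by
  simp [pvF]

lemma pvF_mono (c : Char) (l : List Char) {i j : Nat} (h : i ≤ j) :
    pvF c l i ≤ pvF c l j := by
  unfold pvF
  have h2 : l.take i = (l.take j).take i := by rw [List.take_take, Nat.min_eq_left h]
  rw [h2]
  exact_mod_cast (List.take_sublist i (l.take j)).count_le c

lemma pvF_le_total (c : Char) (l : List Char) (k : Nat) :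
    pvF c l k ≤ (l.count c : Int) := by
  unfold pvF
  exact_mod_cast (List.take_sublist k l).count_le c

lemma pvF_length (c : Char) (l : List Char) : pvF c l l.length = (l.count c : Int) := by
  simp [pvF]

lemma pvF_succ (c : Char) (l : List Char) (i : Nat) (h : i < l.length) :
    pvF c l (i+1) = pvF c l i + (if l.getD i ' ' = c then 1 else 0) := by
  unfold pvF
  rw [List.take_add_one, List.getElem?_eq_getElem h, List.getD_eq_getElem l ' ' h]
  by_cases hc : l[i] = c
  · simp only [Option.toList_some, List.count_append, hc]
    simp
  · simp only [Option.toList_some, List.count_append, if_neg hc]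
    have : List.count c [l[i]] = 0 := by simp [hc]
    simp [this]

lemma pvPart_getD (c : Char) (l : List Char) (i j : Nat) (hj : j ≤ i) :
    (pvPart c l i).getD j 0 = pvF c l j := by
  unfold pvPart
  rw [List.getD_append _ _ _ _ (by simp; omega)]
  exact PySem.List.getD_map_range (pvF c l) (i+1) j 0 (by omega)

-- the prefix-building loop
lemma pvLoop (l : List Char) :
    ∀ i, i ≤ l.length →
    (List.range i).foldl
      (fun (pr : List Int × List Int) i =>
        (pr.1.set (i+1) (pr.1.getD i 0 + (if l.getD i ' ' = '0' then 1 else 0)),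
         pr.2.set (i+1) (pr.2.getD i 0 + (if l.getD i ' ' = '1' then 1 else 0))))
      (List.replicate (l.length+1) 0, List.replicate (l.length+1) 0)
      = (pvPart '0' l i, pvPart '1' l i) := by
  intro i
  induction i with
  | zero =>
    intro _
    simp [pvPart, pvF, List.replicate_succ]
  | succ i ih =>
    intro h
    rw [List.range_succ, List.foldl_append, ih (by omega)]
    simp only [List.foldl_cons, List.foldl_nil]
    have hset : ∀ c, (pvPart c l i).set (i+1) ((pvPart c l i).getD i 0 + (if l.getD i ' ' = c then 1 else 0))
        = pvPart c l (i+1) := by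
      intro c
      rw [pvPart_getD c l i i le_rfl, ← pvF_succ c l i (by omega)]
      unfold pvPart
      rw [List.set_append_right (i+1) _ (by simp)]
      have hrep : l.length - i = (l.length - (i+1)) + 1 := by omega
      rw [hrep, List.replicate_succ]
      simp [List.range_succ]
    rw [hset '0', hset '1']

-- the canonical form of A's double loop, expressed through prefix counts
def pvA (l : List Char) : Int :=
  (List.range l.length).foldl
    (fun m i =>
      (List.range' (i+1) (l.length - i)).foldl
        (fun m j =>
          if pvF '0' l j - pvF '0' l i < pvF '1' l j - pvF '1' l i then
            max m (pvF '0' l j - pvF '0' l i)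
          else if pvF '1' l j - pvF '1' l i < pvF '0' l j - pvF '0' l i then
            max m (pvF '1' l j - pvF '1' l i)
          else m)
        m)
    0

lemma pvA_eq (s : String) : max_removed_chars s = pvA s.toList := by
  simp only [max_removed_chars, pvA]
  rw [pvLoop s.toList s.toList.length le_rfl]
  apply PySem.List.foldl_congr_mem
  intro m i hi
  apply PySem.List.foldl_congr_mem
  intro m' j hj
  rw [List.mem_range] at hi
  rw [List.mem_range'_1] at hj
  dsimp only
  rw [pvPart_getD '0' s.toList _ j (by omega), pvPart_getD '0' s.toList _ i (by omega),
      pvPart_getD '1' s.toList _ j (by omega), pvPart_getD '1' s.toList _ i (by omega)]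

-- generic fold bounds for the specific shape of A's loop
lemma pvFoldl_le {α : Type} (f : Int → α → Int) (xs : List α) (m T : Int)
    (hm : m ≤ T) (h : ∀ m x, x ∈ xs → m ≤ T → f m x ≤ T) : xs.foldl f m ≤ T := by
  induction xs generalizing m with
  | nil => simpa using hm
  | cons a tl ih =>
    simp only [List.foldl_cons]
    exact ih (f m a) (h m a (by simp) hm) (fun m x hx => h m x (by simp [hx]))

lemma pvLe_foldl {α : Type} (f : Int → α → Int) (mono : ∀ m x, m ≤ f m x)
    (xs : List α) (m : Int) : m ≤ xs.foldl f m := by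
  induction xs generalizing m with
  | nil => simp
  | cons a tl ih => exact le_trans (mono m a) (ih (f m a))

lemma pvFoldl_ge {α : Type} (f : Int → α → Int) (mono : ∀ m x, m ≤ f m x)
    (xs : List α) (x : α) (hx : x ∈ xs) (t : Int) (hstep : ∀ m, t ≤ f m x)
    (m : Int) : t ≤ xs.foldl f m := by
  induction xs generalizing m with
  | nil => simp at hx
  | cons a tl ih =>
    simp only [List.foldl_cons]
    rcases List.mem_cons.mp hx with h | h
    · subst h
      exact le_trans (hstep m) (pvLe_foldl f mono tl (f m x))
    · exact ih h (f m a)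

-- if the totals are equal and positive, some proper prefix realises min = total - 1
lemma pvExists (l : List Char) (h : l.count '0' = l.count '1') (hpos : 0 < l.count '0') :
    ∃ p, 1 ≤ p ∧ p ≤ l.length ∧ (l.take p).count '0' ≠ (l.take p).count '1' ∧
      min ((l.take p).count '0') ((l.take p).count '1') = l.count '0' - 1 := by
  induction l using List.reverseRecOn with
  | nil => simp at hpos
  | append_singleton l' a ih =>
    by_cases ha0 : a = '0'
    · subst ha0
      have hc : (l' ++ ['0']).count '0' = l'.count '0' + 1 := by simp
      have hc1 : (l' ++ ['0']).count '1' = l'.count '1' := by simp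
      have htake : (l' ++ ['0']).take l'.length = l' := by
        rw [List.take_append_of_le_length le_rfl, List.take_length]
      have hlen : l'.count '1' ≤ l'.length := List.count_le_length
      rw [hc, hc1] at h
      refine ⟨l'.length, by omega, by simp, ?_, ?_⟩
      · rw [htake]; omega
      · rw [htake, hc]; omega
    · by_cases ha1 : a = '1'
      · subst ha1
        have hc : (l' ++ ['1']).count '0' = l'.count '0' := by simp
        have hc1 : (l' ++ ['1']).count '1' = l'.count '1' + 1 := by simp
        have htake : (l' ++ ['1']).take l'.length = l' := by
          rw [List.take_append_of_le_length le_rfl, List.take_length]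
        have hlen : l'.count '0' ≤ l'.length := List.count_le_length
        rw [hc, hc1] at h
        rw [hc] at hpos
        refine ⟨l'.length, by omega, by simp, ?_, ?_⟩
        · rw [htake]; omega
        · rw [htake, hc]; omega
      · have hc : (l' ++ [a]).count '0' = l'.count '0' := by
          have h0 : List.count '0' [a] = 0 := by simp [ha0]
          simp [List.count_append, h0]
        have hc1 : (l' ++ [a]).count '1' = l'.count '1' := by
          have h1 : List.count '1' [a] = 0 := by simp [ha1]
          simp [List.count_append, h1]
        rw [hc, hc1] at h
        rw [hc] at hpos
        obtain ⟨p, h1, h2, h3, h4⟩ := ih h hpos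
        have htake : (l' ++ [a]).take p = l'.take p := List.take_append_of_le_length h2
        refine ⟨p, h1, by simp; omega, by rwa [htake], ?_⟩
        rw [htake, hc]
        exact h4

-- B's closed form as a function of the character list
lemma pvAlt_eq (s : String) :
    max_removed_chars_alt s =
      (if (s.toList.count '0' : Int) ≠ (s.toList.count '1' : Int) then
        min (s.toList.count '0' : Int) (s.toList.count '1' : Int)
      else max ((s.toList.count '0' : Int) - 1) 0) := rfl

-- the inner-loop step (abbreviation for the proofs below)
def pvStep (l : List Char) (i : Nat) (m : Int) (j : Nat) : Int :=
  if pvF '0' l j - pvF '0' l i < pvF '1' l j - pvF '1' l i then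
    max m (pvF '0' l j - pvF '0' l i)
  else if pvF '1' l j - pvF '1' l i < pvF '0' l j - pvF '0' l i then
    max m (pvF '1' l j - pvF '1' l i)
  else m

lemma pvStep_mono (l : List Char) (i : Nat) : ∀ m j, m ≤ pvStep l i m j := by
  intro m j
  unfold pvStep
  split_ifs <;> simp

lemma pvOuter_mono (l : List Char) :
    ∀ (m : Int) (i : Nat), m ≤ (List.range' (i+1) (l.length - i)).foldl (pvStep l i) m := by
  intro m i
  exact pvLe_foldl (pvStep l i) (pvStep_mono l i) _ m

lemma pvMain (l : List Char) :
    pvA l = (if (l.count '0' : Int) ≠ (l.count '1' : Int) then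
        min (l.count '0' : Int) (l.count '1' : Int)
      else max ((l.count '0' : Int) - 1) 0) := by
  have hA : pvA l = (List.range l.length).foldl
      (fun m i => (List.range' (i+1) (l.length - i)).foldl (pvStep l i) m) 0 := rfl
  set t0 : Int := (l.count '0' : Int) with ht0
  set t1 : Int := (l.count '1' : Int) with ht1
  set T : Int := (if t0 ≠ t1 then min t0 t1 else max (t0 - 1) 0) with hT
  have ht0n : 0 ≤ t0 := by simp [ht0]
  have ht1n : 0 ≤ t1 := by simp [ht1]
  show pvA l = T
  rw [hA]
  apply le_antisymm
  -- upper bound: every contribution is ≤ T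
  · apply pvFoldl_le _ _ _ T (by simp [hT]; split_ifs <;> omega)
    intro m i _ hm
    apply pvFoldl_le _ _ _ T hm
    intro m' j hj hm'
    rw [List.mem_range'_1] at hj
    have hij : pvF '0' l i ≤ pvF '0' l j := pvF_mono '0' l (by omega)
    have hij1 : pvF '1' l i ≤ pvF '1' l j := pvF_mono '1' l (by omega)
    have h0j : pvF '0' l j ≤ t0 := pvF_le_total '0' l j
    have h1j : pvF '1' l j ≤ t1 := pvF_le_total '1' l j
    have h0i : 0 ≤ pvF '0' l i := pvF_nonneg '0' l i
    have h1i : 0 ≤ pvF '1' l i := pvF_nonneg '1' l i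
    unfold pvStep
    rw [hT]
    split_ifs <;> omega
  -- lower bound
  · by_cases hTle : T ≤ 0
    · exact le_trans hTle (pvLe_foldl _ (pvOuter_mono l) (List.range l.length) 0)
    · push_neg at hTle
      have hn0 : 0 < l.length := by
        rcases Nat.eq_zero_or_pos l.length with h | h
        · exfalso
          have : l = [] := List.eq_nil_of_length_eq_zero h
          subst this
          simp [hT, ht0, ht1] at hTle
        · exact h
      by_cases hne : t0 ≠ t1
      -- totals differ: the whole string (pair (0, n)) realises min t0 t1
      · have hTmin : T = min t0 t1 := by rw [hT, if_pos hne]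
        apply pvFoldl_ge _ (pvOuter_mono l) _ 0 (by simpa using hn0) T _ 0
        intro m
        apply pvFoldl_ge (pvStep l 0) (pvStep_mono l 0) _ l.length
          (by rw [List.mem_range'_1]; omega) T _ m
        intro m'
        unfold pvStep
        rw [pvF_zero, pvF_zero, pvF_length, pvF_length, ← ht0, ← ht1, hTmin]
        split_ifs <;> omega
      -- totals equal (and positive): a proper prefix realises t0 - 1
      · push_neg at hne
        have ht0pos : 0 < t0 := by
          by_contra hc
          push_neg at hc
          rw [hT, if_neg (by simp [hne])] at hTle
          omega
        have hTeq : T = t0 - 1 := by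
          rw [hT, if_neg (by simp [hne])]
          omega
        have hposN : 0 < l.count '0' := by rw [ht0] at ht0pos; exact_mod_cast ht0pos
        have heqN : l.count '0' = l.count '1' := by
          have h' := hne
          rw [ht0, ht1] at h'
          exact_mod_cast h'
        obtain ⟨p, hp1, hp2, hp3, hp4⟩ := pvExists l heqN hposN
        apply pvFoldl_ge _ (pvOuter_mono l) _ 0 (by simpa using hn0) T _ 0
        intro m
        apply pvFoldl_ge (pvStep l 0) (pvStep_mono l 0) _ p
          (by rw [List.mem_range'_1]; omega) T _ m
        intro m'
        unfold pvStep
        rw [pvF_zero, pvF_zero]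
        have e0 : pvF '0' l p = ((l.take p).count '0' : Int) := rfl
        have e1 : pvF '1' l p = ((l.take p).count '1' : Int) := rfl
        rw [e0, e1, hTeq, ht0]
        have hp4' : min ((l.take p).count '0' : Int) ((l.take p).count '1' : Int)
            = (l.count '0' : Int) - 1 := by
          have := hp4
          omega
        have hp3' : ((l.take p).count '0' : Int) ≠ ((l.take p).count '1' : Int) := by
          exact_mod_cast hp3
        split_ifs <;> omega

-- ===== VERDICT (by name: the statement is the Claim_ definition above) =====
theorem max_removed_chars_spec : Claim_equal_max_removed_chars := by
  intro s _
  show max_removed_chars s = max_removed_chars_alt s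
  rw [pvA_eq, pvAlt_eq, pvMain]
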